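-- pv_equiv track=rewrite | github.com/TingjiaInFuture/pixrep | pixrep/flowables.py | _strip_nonword
-- ===== SOURCE A (Python) =====
-- def _strip_nonword(token: str) -> str:
--     start = 0
--     end = len(token)
--     while start < end and not (token[start].isalnum() or token[start] == "_"):
--         start += 1
--     while end > start and not (token[end - 1].isalnum() or token[end - 1] == "_"):
--         end -= 1
--     return token[start:end]
-- ===== SOURCE B (Python) =====
-- def _strip_nonword(token: str) -> str:
--     first = None
--     last = 0
--     for i, c in enumerate(token):
--         if c.isalnum() or c == "_":
--             if first is None:
--                 first = i
--             last = i
--     if first is None: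
--         return ""
--     return token[first:last + 1]
-- ===== Notes on version B (the rewrite author's own statement) =====
-- stated objective: alternative
-- what changed: Replaces the two end-trimming while-loops (advance start, retreat end) by a single forward scan that records the first and last word-character indices and slices once.
import Mathlib
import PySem

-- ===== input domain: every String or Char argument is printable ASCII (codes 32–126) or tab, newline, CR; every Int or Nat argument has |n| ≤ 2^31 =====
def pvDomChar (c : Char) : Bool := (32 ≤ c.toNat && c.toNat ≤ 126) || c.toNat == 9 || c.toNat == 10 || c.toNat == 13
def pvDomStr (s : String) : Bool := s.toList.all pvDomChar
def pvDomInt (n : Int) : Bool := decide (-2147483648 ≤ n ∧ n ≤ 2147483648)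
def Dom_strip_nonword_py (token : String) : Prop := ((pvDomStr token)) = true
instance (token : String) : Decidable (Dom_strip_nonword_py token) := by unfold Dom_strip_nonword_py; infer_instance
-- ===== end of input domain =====

-- B replaces A's two end-trimming while-loops by one forward scan recording first/last word indices (alternative decomposition, same cost).

-- ===== PORT A =====
-- A's first while loop advances start past leading non-word chars: structurally, drop the non-word prefix.
def pvATrim : List Char → List Char
  | [] => []
  | c :: cs => if !(PySem.Chars.isalnum c || c == '_') then pvATrim cs else c :: cs

-- the second while loop retreats end past trailing non-word chars (= the same trim on the reversed remainder); token[start:end] is the remaining middle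
def strip_nonword_py (token : String) : String :=
  String.mk ((pvATrim ((pvATrim token.toList).reverse)).reverse)

-- ===== PORT B =====
-- one step of B's for-loop over enumerate(token): on a word char set first (if unset) and update last
def pvBStep (st : Option Int × Int) (p : Int × Char) : Option Int × Int :=
  if PySem.Chars.isalnum p.2 || p.2 == '_' then
    (if st.1.isNone then some p.1 else st.1, p.1)
  else st

def strip_nonword_py_alt (token : String) : String :=
  let st := (PySem.List.enumerate token.toList 0).foldl pvBStep (none, 0)
  match st.1 with
  | none => ""
  | some f => String.mk (PySem.List.slice token.toList (some f) (some (st.2 + 1)))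

-- ===== PRECONDITION & SPEC =====
def Spec_strip_nonword_py (token : String) (out : String) : Prop := out = strip_nonword_py_alt token
instance (token : String) (out : String) : Decidable (Spec_strip_nonword_py token out) := by unfold Spec_strip_nonword_py; infer_instance

-- ===== CLAIM (what is proved, stated in full; the proofs are below) =====
def Claim_equal_strip_nonword_py : Prop := ∀ (token : String), Dom_strip_nonword_py token → Spec_strip_nonword_py token (strip_nonword_py token)

-- ===== LEMMAS AND PROOFS =====

-- proof-only helpers: the non-word predicate, length after dropping the non-word prefix / suffix
def pvQ (c : Char) : Bool := !(PySem.Chars.isalnum c || c == '_')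
def pvFirst (l : List Char) : Nat := (l.dropWhile pvQ).length
def pvLast (l : List Char) : Nat := (l.reverse.dropWhile pvQ).length

theorem pvATrim_eq (l : List Char) : pvATrim l = l.dropWhile pvQ := by
  induction l with
  | nil => rfl
  | cons c cs ih => by_cases h : (PySem.Chars.isalnum c || c == '_') = true <;>
      simp [pvATrim, List.dropWhile_cons, pvQ, h, ih]

theorem pvFirst_le (l : List Char) : pvFirst l ≤ l.length :=
  (List.dropWhile_sublist _).length_le

theorem pvLast_le (l : List Char) : pvLast l ≤ l.length := by
  have := (List.dropWhile_sublist (p := pvQ) (l := l.reverse)).length_le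
  simpa [pvLast] using this

theorem pvFirst_zero_iff (l : List Char) : pvFirst l = 0 ↔ pvLast l = 0 := by
  simp [pvFirst, pvLast, List.length_eq_zero_iff, List.dropWhile_eq_nil_iff]

theorem pvLast_cons (c : Char) (cs : List Char) :
    pvLast (c :: cs) = if pvLast cs = 0 then (if pvQ c then 0 else 1) else pvLast cs + 1 := by
  have : (c :: cs).reverse = cs.reverse ++ [c] := by simp
  rw [pvLast, this, List.dropWhile_append]
  by_cases h : pvLast cs = 0
  · have hnil : cs.reverse.dropWhile pvQ = [] := by
      simpa [pvLast, List.length_eq_zero_iff] using h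
    simp [hnil, List.dropWhile, pvLast]
    by_cases hq : pvQ c = true <;> simp [hq]
  · have hne : cs.reverse.dropWhile pvQ ≠ [] := by
      simpa [pvLast, List.length_eq_zero_iff] using h
    simp [List.isEmpty_iff, hne, pvLast, h]

theorem pvLen_le (l : List Char) (h : pvFirst l ≠ 0) : l.length ≤ pvFirst l + pvLast l - 1 := by
  induction l with
  | nil => simp [pvFirst] at h
  | cons c cs ih =>
    by_cases hw : (PySem.Chars.isalnum c || c == '_') = true
    · have hq : pvQ c = false := by simp [pvQ, hw]
      have h1 : pvLast (c :: cs) ≠ 0 := by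
        rw [pvLast_cons, hq]; split_ifs <;> simp_all
      have h2 : pvFirst (c :: cs) = cs.length + 1 := by
        simp [pvFirst, List.dropWhile_cons, pvQ, hw]
      simp [h2]; omega
    · have hq : pvQ c = true := by simp [pvQ, hw]
      have h2 : pvFirst (c :: cs) = pvFirst cs := by
        simp [pvFirst, List.dropWhile_cons, hq]
      rw [h2] at h ⊢
      have h3 : pvLast cs ≠ 0 := by
        intro h0; exact h ((pvFirst_zero_iff cs).mpr h0)
      have := ih h
      rw [pvLast_cons]; simp [h3]; omega

-- dropWhile p l is the suffix of l of length (dropWhile p l).length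
theorem pvDrop_eq (p : Char → Bool) (l : List Char) :
    l.dropWhile p = l.drop (l.length - (l.dropWhile p).length) := by
  induction l with
  | nil => rfl
  | cons c cs ih =>
    by_cases h : p c = true
    · have hle := (List.dropWhile_sublist (p := p) (l := cs)).length_le
      rw [List.dropWhile_cons, if_pos h]
      have h1 : (c :: cs).length - (cs.dropWhile p).length = (cs.length - (cs.dropWhile p).length) + 1 := by
        simp only [List.length_cons]; omega
      rw [h1, List.drop_succ_cons]
      exact ih
    · simp [List.dropWhile_cons, h]

-- dropWhile commutes with take once take keeps the whole dropped prefix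
theorem pvDW_take (p : Char → Bool) (l : List Char) (m : Nat)
    (h : l.length - (l.dropWhile p).length ≤ m) :
    (l.take m).dropWhile p = (l.dropWhile p).take (m - (l.length - (l.dropWhile p).length)) := by
  induction l generalizing m with
  | nil => simp
  | cons c cs ih =>
    by_cases hp : p c = true
    · have hle := (List.dropWhile_sublist (p := p) (l := cs)).length_le
      rw [List.dropWhile_cons, if_pos hp] at h ⊢
      simp only [List.length_cons] at h ⊢
      have hm : 1 ≤ m := by omega
      obtain ⟨m', rfl⟩ : ∃ m', m = m' + 1 := ⟨m - 1, by omega⟩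
      rw [List.take_succ_cons, List.dropWhile_cons, if_pos hp, ih m' (by omega)]
      congr 1; omega
    · rw [List.dropWhile_cons, if_neg (by simpa using hp)]
      cases m with
      | zero => simp
      | succ m' =>
        rw [List.take_succ_cons, List.dropWhile_cons, if_neg (by simpa using hp)]
        simp

-- trimming the reversed list and reversing back is take (pvLast)
theorem pvTrimR_eq (x : List Char) : (pvATrim x.reverse).reverse = x.take (pvLast x) := by
  induction x using List.reverseRecOn with
  | nil => rfl
  | append_singleton xs c ih =>
    rw [pvATrim_eq] at ih ⊢
    have hrev : (xs ++ [c]).reverse = c :: xs.reverse := by simp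
    have hlast : pvLast (xs ++ [c]) = ((c :: xs.reverse).dropWhile pvQ).length := by
      simp [pvLast]
    by_cases hq : pvQ c = true
    · have hd : (c :: xs.reverse).dropWhile pvQ = xs.reverse.dropWhile pvQ := by
        simp [List.dropWhile_cons, hq]
      have hlast' : pvLast (xs ++ [c]) = pvLast xs := by rw [hlast, hd]; rfl
      rw [hrev, hd, ih, hlast']
      rw [List.take_append_of_le_length (pvLast_le xs)]
    · have hd : (c :: xs.reverse).dropWhile pvQ = c :: xs.reverse := by
        simp [List.dropWhile_cons, hq]
      have hlast' : pvLast (xs ++ [c]) = xs.length + 1 := by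
        rw [hlast, hd]; simp
      rw [hrev, hd, hlast']
      simp [List.take_of_length_le]

-- B's fold once first is set: first stays, last becomes the index of the last word char (or d)
theorem pvS (l : List Char) (s : Int) (x d : Int) :
    (PySem.List.enumerate l s).foldl pvBStep (some x, d) =
      (some x, if pvLast l = 0 then d else s + pvLast l - 1) := by
  induction l generalizing s d with
  | nil => simp [PySem.List.enumerate_nil, pvLast]
  | cons c cs ih =>
    rw [PySem.List.enumerate_cons, List.foldl_cons]
    by_cases hw : (PySem.Chars.isalnum c || c == '_') = true
    · have hstep : pvBStep (some x, d) (s, c) = (some x, s) := by simp [pvBStep, hw]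
      rw [hstep, ih]
      rw [pvLast_cons]
      have hq : pvQ c = false := by simp [pvQ, hw]
      by_cases h0 : pvLast cs = 0 <;> simp [h0, hq] <;> push_cast <;> omega
    · have hstep : pvBStep (some x, d) (s, c) = (some x, d) := by simp [pvBStep, hw]
      rw [hstep, ih]
      rw [pvLast_cons]
      have hq : pvQ c = true := by simp [pvQ, hw]
      by_cases h0 : pvLast cs = 0 <;> simp [h0, hq] <;> push_cast <;> omega

-- B's fold from the initial state: none if no word char, else the first/last word indices
theorem pvN (l : List Char) (s : Int) (d : Int) :
    (PySem.List.enumerate l s).foldl pvBStep (none, d) =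
      if pvFirst l = 0 then (none, d)
      else (some (s + l.length - pvFirst l), s + pvLast l - 1) := by
  induction l generalizing s d with
  | nil => simp [PySem.List.enumerate_nil, pvFirst]
  | cons c cs ih =>
    rw [PySem.List.enumerate_cons, List.foldl_cons]
    by_cases hw : (PySem.Chars.isalnum c || c == '_') = true
    · have hstep : pvBStep (none, d) (s, c) = (some s, s) := by simp [pvBStep, hw]
      have hq : pvQ c = false := by simp [pvQ, hw]
      have hfirst : pvFirst (c :: cs) = cs.length + 1 := by
        simp [pvFirst, List.dropWhile_cons, pvQ, hw]
      rw [hstep, pvS cs (s + 1) s s, hfirst, pvLast_cons]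
      by_cases h0 : pvLast cs = 0 <;> simp [h0, hq] <;> push_cast <;> omega
    · have hstep : pvBStep (none, d) (s, c) = (none, d) := by simp [pvBStep, hw]
      have hq : pvQ c = true := by simp [pvQ, hw]
      have hfirst : pvFirst (c :: cs) = pvFirst cs := by
        simp [pvFirst, List.dropWhile_cons, hq]
      rw [hstep, ih, hfirst]
      by_cases h0 : pvFirst cs = 0
      · simp [h0]
      · have h3 : pvLast cs ≠ 0 := fun hz => h0 ((pvFirst_zero_iff cs).mpr hz)
        have hle := pvFirst_le cs
        rw [pvLast_cons]
        simp [h0, h3, hq]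
        constructor <;> push_cast <;> omega

-- ===== VERDICT (by name: the statement is the Claim_ definition above) =====
theorem strip_nonword_py_spec : Claim_equal_strip_nonword_py := by
  intro token _
  unfold Spec_strip_nonword_py strip_nonword_py strip_nonword_py_alt
  set l := token.toList with hl
  rw [pvN l 0 0]
  by_cases h0 : pvFirst l = 0
  · have hnil : l.dropWhile pvQ = [] := by
      simpa [pvFirst, List.length_eq_zero_iff] using h0
    simp [h0, pvATrim_eq, hnil, pvATrim]
    rfl
  · have hF := pvFirst_le l
    have hL := pvLast_le l
    have hLen := pvLen_le l h0
    have hL1 : pvLast l ≠ 0 := fun hz => h0 ((pvFirst_zero_iff l).mpr hz)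
    simp only [h0, if_neg, ite_false]
    -- rewrite the slice bounds to Nat casts
    have hb1 : (0 : Int) + (l.length : Int) - (pvFirst l : Int) = ((l.length - pvFirst l : Nat) : Int) := by
      push_cast; omega
    have hb2 : (0 : Int) + (pvLast l : Int) - 1 + 1 = ((pvLast l : Nat) : Int) := by
      push_cast; omega
    rw [hb1, hb2, PySem.List.slice_natCast]
    -- A side: trim left then right
    rw [pvTrimR_eq, pvATrim_eq]
    -- identify the left-trimmed list as a drop
    have hdrop : l.dropWhile pvQ = l.drop (l.length - pvFirst l) := pvDrop_eq pvQ l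
    -- compute pvLast of the left-trimmed list
    have hrev : (l.dropWhile pvQ).reverse = l.reverse.take (pvFirst l) := by
      rw [hdrop, List.reverse_drop]
      congr 1; omega
    have hcond : l.reverse.length - (l.reverse.dropWhile pvQ).length ≤ pvFirst l := by
      simp only [List.length_reverse]
      have : (l.reverse.dropWhile pvQ).length = pvLast l := rfl
      omega
    have hlast : pvLast (l.dropWhile pvQ) = pvLast l - (l.length - pvFirst l) := by
      unfold pvLast
      rw [hrev, pvDW_take pvQ l.reverse (pvFirst l) hcond]
      have : (l.reverse.dropWhile pvQ).length = pvLast l := rfl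
      simp only [List.length_take, this, List.length_reverse]
      omega
    rw [hlast, hdrop]
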